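-- pv_equiv track=rewrite | github.com/kang2000h/Deep_Learning | rnn/preprocess/Endpoint_Detecter.py | find_start_energy
-- ===== SOURCE A (Python) =====
-- def find_start_energy(energy, start_interval, IAV_thresh, check=5):
--     '''
--     :param energy: a vector of Integral Absolute Values of the energy from audio
--     :param start_interval: starting point to search start_interval
--     :param IAV_thresh: .
--     :param check: how much you wanna check energy seq whether it is more than IAV threshold or not
--     :return: A index of energy vector
--     '''
--     count = 0
--     for i in range(start_interval, len(energy)):
--         if energy[i] > IAV_thresh:
--             count += 1
--             if count==check:
--                 start_interval = i-(check-1)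
--                 return start_interval # first one bigger than threshold
--         else:
--             count=0
--     return 0
-- ===== SOURCE B (Python) =====
-- def find_start_energy(energy, start_interval, IAV_thresh, check=5):
--     # Run-segmentation scan: walk maximal above-threshold runs and return the
--     # start index of the first run of length >= check (0 if none).
--     if check < 1:
--         return 0
--     n = len(energy)
--     i = start_interval
--     while i < n:
--         if energy[i] > IAV_thresh:
--             j = i + 1
--             while j < n and energy[j] > IAV_thresh:
--                 j += 1
--             if j - i >= check:
--                 return i
--             i = j
--         else:
--             i += 1
--     return 0
-- ===== Notes on version B (the rewrite author's own statement) =====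
-- stated objective: alternative
-- what changed: Replaced the per-element count-and-reset loop with a run-segmentation scan: an outer index loop finds each maximal above-threshold run via an inner scan and returns the run's start index directly when its length reaches check, keeping no counter state.
import Mathlib
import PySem

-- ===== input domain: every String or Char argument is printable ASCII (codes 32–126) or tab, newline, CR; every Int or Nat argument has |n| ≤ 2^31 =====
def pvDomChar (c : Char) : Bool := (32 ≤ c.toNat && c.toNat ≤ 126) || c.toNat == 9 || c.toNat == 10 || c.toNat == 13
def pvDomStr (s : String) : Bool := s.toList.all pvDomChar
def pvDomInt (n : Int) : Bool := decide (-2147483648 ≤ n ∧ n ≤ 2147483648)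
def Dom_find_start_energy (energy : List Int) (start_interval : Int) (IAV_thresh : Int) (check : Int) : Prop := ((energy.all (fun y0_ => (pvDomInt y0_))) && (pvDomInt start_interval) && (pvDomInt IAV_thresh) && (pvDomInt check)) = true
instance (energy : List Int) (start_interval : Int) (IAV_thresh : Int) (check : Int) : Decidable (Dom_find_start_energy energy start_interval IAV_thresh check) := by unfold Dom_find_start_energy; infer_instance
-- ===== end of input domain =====

-- B replaces A's count-and-reset loop by a run-segmentation scan (same O(n) cost, different decomposition).

-- ===== PORT A =====
-- the for-loop over range(start_interval, len(energy)) with the running `count`;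
-- pyGet? none (IndexError) is represented by returning 0 (excluded by Pre_).
def find_start_energy_loopA (energy : List Int) (t check : Int) : List Int → Int → Int
  | [], _ => 0
  | i :: rest, count =>
    match PySem.List.pyGet? energy i with
    | none => 0
    | some v =>
      if v > t then
        if count + 1 = check then i - (check - 1)
        else find_start_energy_loopA energy t check rest (count + 1)
      else find_start_energy_loopA energy t check rest 0

def find_start_energy (energy : List Int) (start_interval : Int) (IAV_thresh : Int) (check : Int) : Int :=
  find_start_energy_loopA energy IAV_thresh check
    (PySem.List.pyRange start_interval (energy.length : Int) 1) 0

-- ===== PORT B =====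
-- inner while: advance j to the end of the current above-threshold run
def find_start_energy_runEnd (energy : List Int) (t n j : Int) : Int :=
  if h : j < n then
    match PySem.List.pyGet? energy j with
    | some v => if v > t then find_start_energy_runEnd energy t n (j + 1) else j
    | none => j
  else j
termination_by (n - j).toNat
decreasing_by omega

theorem find_start_energy_runEnd_ge (energy : List Int) (t n j : Int) :
    j ≤ find_start_energy_runEnd energy t n j := by
  unfold find_start_energy_runEnd
  split
  · split
    · split
      · have := find_start_energy_runEnd_ge energy t n (j + 1); omega
      · omega
    · omega
  · omega
termination_by (n - j).toNat
decreasing_by omega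

-- outer while over i
def find_start_energy_outer (energy : List Int) (t check n i : Int) : Int :=
  if h : i < n then
    match PySem.List.pyGet? energy i with
    | none => 0
    | some v =>
      if v > t then
        let j := find_start_energy_runEnd energy t n (i + 1)
        if check ≤ j - i then i else find_start_energy_outer energy t check n j
      else find_start_energy_outer energy t check n (i + 1)
  else 0
termination_by (n - i).toNat
decreasing_by
  · have := find_start_energy_runEnd_ge energy t n (i + 1); omega
  · omega

def find_start_energy_alt (energy : List Int) (start_interval : Int) (IAV_thresh : Int) (check : Int) : Int :=
  if check < 1 then 0
  else find_start_energy_outer energy IAV_thresh check (energy.length : Int) start_interval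

-- ===== PRECONDITION & SPEC =====
-- Pre_ excludes exactly the inputs on which the Python A raises IndexError:
-- start_interval below -len(energy) makes the first access energy[start_interval] out of range.
def Pre_find_start_energy (energy : List Int) (start_interval : Int) (IAV_thresh : Int) (check : Int) : Prop :=
  -(energy.length : Int) ≤ start_interval
instance (energy : List Int) (start_interval : Int) (IAV_thresh : Int) (check : Int) : Decidable (Pre_find_start_energy energy start_interval IAV_thresh check) := by unfold Pre_find_start_energy; infer_instance

def pvWitness_find_start_energy : List Int × Int × Int × Int := ([1, 5, 7, 7, 2], 1, 4, 2)

def Spec_find_start_energy (energy : List Int) (start_interval : Int) (IAV_thresh : Int) (check : Int) (out : Int) : Prop := out = find_start_energy_alt energy start_interval IAV_thresh check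
instance (energy : List Int) (start_interval : Int) (IAV_thresh : Int) (check : Int) (out : Int) : Decidable (Spec_find_start_energy energy start_interval IAV_thresh check out) := by unfold Spec_find_start_energy; infer_instance

-- ===== CLAIM (what is proved, stated in full; the proofs are below) =====
def Claim_equal_find_start_energy : Prop := ∀ (energy : List Int) (start_interval : Int) (IAV_thresh : Int) (check : Int), Dom_find_start_energy energy start_interval IAV_thresh check → Pre_find_start_energy energy start_interval IAV_thresh check → Spec_find_start_energy energy start_interval IAV_thresh check (find_start_energy energy start_interval IAV_thresh check)


-- ===== LEMMAS AND PROOFS =====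

theorem runEnd_of_ge (energy : List Int) (t n j : Int) (h : n ≤ j) :
    find_start_energy_runEnd energy t n j = j := by
  unfold find_start_energy_runEnd; simp [show ¬ j < n by omega]

theorem runEnd_of_none (energy : List Int) (t n j : Int) (h : j < n)
    (hg : PySem.List.pyGet? energy j = none) :
    find_start_energy_runEnd energy t n j = j := by
  unfold find_start_energy_runEnd; simp [h, hg]

theorem runEnd_of_le (energy : List Int) (t n j v : Int) (h : j < n)
    (hg : PySem.List.pyGet? energy j = some v) (hv : ¬ v > t) :
    find_start_energy_runEnd energy t n j = j := by
  unfold find_start_energy_runEnd; simp [h, hg, hv]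

theorem runEnd_of_gt (energy : List Int) (t n j v : Int) (h : j < n)
    (hg : PySem.List.pyGet? energy j = some v) (hv : v > t) :
    find_start_energy_runEnd energy t n j = find_start_energy_runEnd energy t n (j + 1) := by
  conv_lhs => unfold find_start_energy_runEnd
  simp [h, hg, hv]

theorem loopA_of_check_nonpos (energy : List Int) (t check : Int) (hc : check < 1) :
    ∀ (l : List Int) (c : Int), 0 ≤ c → find_start_energy_loopA energy t check l c = 0 := by
  intro l
  induction l with
  | nil => intro c _; rfl
  | cons i rest ih =>
    intro c hc0
    unfold find_start_energy_loopA
    cases hg : PySem.List.pyGet? energy i with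
    | none => rfl
    | some v =>
      by_cases hv : v > t
      · simp [hv, show ¬ c + 1 = check by omega, ih (c + 1) (by omega)]
      · simp [hv, ih 0 le_rfl]

-- A's loop from position p with streak count c equals B's run-segmentation view:
-- return p - c (the run start) if the current run reaches check, else continue at the run's
-- end; the first conjunct is the plain equality of the two loops from position p.
theorem loopA_both (energy : List Int) (t check : Int) (hc1 : 1 ≤ check) (p : Int) :
    (find_start_energy_loopA energy t check
        (PySem.List.pyRange p (energy.length : Int) 1) 0 =
      find_start_energy_outer energy t check (energy.length : Int) p) ∧
    (∀ c : Int, 0 ≤ c → c < check →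
      find_start_energy_loopA energy t check
        (PySem.List.pyRange p (energy.length : Int) 1) c =
      if check ≤ c + (find_start_energy_runEnd energy t (energy.length : Int) p - p) then p - c
      else find_start_energy_outer energy t check (energy.length : Int)
             (find_start_energy_runEnd energy t (energy.length : Int) p)) := by
  have hrun : ∀ c : Int, 0 ≤ c → c < check →
      find_start_energy_loopA energy t check
        (PySem.List.pyRange p (energy.length : Int) 1) c =
      if check ≤ c + (find_start_energy_runEnd energy t (energy.length : Int) p - p) then p - c
      else find_start_energy_outer energy t check (energy.length : Int)
             (find_start_energy_runEnd energy t (energy.length : Int) p) := by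
    intro c hc0 hcc
    by_cases hp : p < (energy.length : Int)
    · rw [PySem.List.pyRange_one_cons hp]
      unfold find_start_energy_loopA
      cases hg : PySem.List.pyGet? energy p with
      | none =>
        rw [runEnd_of_none energy t _ p hp hg]
        simp only []
        rw [if_neg (by omega)]
        unfold find_start_energy_outer
        simp [hp, hg]
      | some v =>
        by_cases hv : v > t
        · rw [runEnd_of_gt energy t _ p v hp hg hv]
          have hge := find_start_energy_runEnd_ge energy t (energy.length : Int) (p + 1)
          by_cases he : c + 1 = check
          · simp only [hv, if_pos, he]
            rw [if_pos (by omega)]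
            omega
          · simp only [hv, if_pos, he, if_false]
            rw [(loopA_both energy t check hc1 (p + 1)).2 (c + 1) (by omega) (by omega)]
            have harith : (check ≤ c + 1 + (find_start_energy_runEnd energy t (energy.length : Int) (p + 1) - (p + 1))) ↔ (check ≤ c + (find_start_energy_runEnd energy t (energy.length : Int) (p + 1) - p)) := by omega
            split
            · rename_i hcond
              rw [if_pos (harith.mp hcond)]; omega
            · rename_i hcond
              rw [if_neg (fun hx => hcond (harith.mpr hx))]
        · rw [runEnd_of_le energy t _ p v hp hg hv]
          simp only [hv, if_neg, not_false_iff]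
          rw [if_neg (by omega)]
          rw [(loopA_both energy t check hc1 (p + 1)).1]
          conv_rhs => unfold find_start_energy_outer
          simp [hp, hg, hv]
    · rw [PySem.List.pyRange_one_eq_nil (by omega)]
      rw [runEnd_of_ge energy t _ p (by omega)]
      rw [if_neg (by omega)]
      unfold find_start_energy_loopA find_start_energy_outer
      simp [hp]
  refine ⟨?_, hrun⟩
  have h0 := hrun 0 le_rfl (by omega)
  by_cases hp : p < (energy.length : Int)
  · cases hg : PySem.List.pyGet? energy p with
    | none =>
      rw [runEnd_of_none energy t _ p hp hg] at h0
      rw [if_neg (by omega)] at h0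
      exact h0
    | some v =>
      by_cases hv : v > t
      · rw [runEnd_of_gt energy t _ p v hp hg hv] at h0
        rw [h0]
        conv_rhs => unfold find_start_energy_outer
        simp only [hp, dif_pos, hg, hv, if_pos]
        have harith : (check ≤ 0 + (find_start_energy_runEnd energy t (energy.length : Int) (p + 1) - p)) ↔ (check ≤ find_start_energy_runEnd energy t (energy.length : Int) (p + 1) - p) := by omega
        split
        · rename_i hcond
          rw [if_pos (harith.mp hcond)]; omega
        · rename_i hcond
          rw [if_neg (fun hx => hcond (harith.mpr hx))]
      · rw [runEnd_of_le energy t _ p v hp hg hv] at h0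
        rw [if_neg (by omega)] at h0
        exact h0
  · rw [runEnd_of_ge energy t _ p (by omega)] at h0
    rw [if_neg (by omega)] at h0
    exact h0
termination_by ((energy.length : Int) - p).toNat
decreasing_by all_goals omega

-- ===== VERDICT (by name: the statement is the Claim_ definition above) =====
theorem find_start_energy_spec : Claim_equal_find_start_energy := by
  intro energy start_interval IAV_thresh check _ _
  unfold Spec_find_start_energy find_start_energy find_start_energy_alt
  by_cases hc : check < 1
  · rw [if_pos hc]
    exact loopA_of_check_nonpos energy IAV_thresh check hc _ 0 le_rfl
  · rw [if_neg hc]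
    exact (loopA_both energy IAV_thresh check (by omega) start_interval).1
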